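-- pv_equiv track=rewrite | github.com/GOLAJ-Enterprises/SP-14-Blue-Chess-AI | bitboarder/mask_gens.py | gen_knight_mask
-- ===== SOURCE A (Python) =====
-- def gen_knight_mask(square: int) -> int:
--     """Generates a bit mask of all valid knight moves from a given square.
--
--     The knight moves in L-shapes: two steps in one direction and one step in the perpendicular
--     direction. This function calculates all such possible destinations from the given square,
--     excluding any that would move off the board.
--
--     :param int square: The square to generate the knight moves from.
--     :return int: The knight move mask.
--     """
--     # Decode square index into (file, rank)
--     file = square % 8
--     rank = square // 8
--     mask = 0
--
--     # Try all 8 potential knight jumps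
--     for df, dr in [
--         (-2, -1),
--         (-2, 1),
--         (-1, -2),
--         (-1, 2),
--         (1, -2),
--         (1, 2),
--         (2, -1),
--         (2, 1),
--     ]:
--         new_file = file + df
--         new_rank = rank + dr
--
--         # Skip move if it would leave the board
--         if 0 <= new_file < 8 and 0 <= new_rank < 8:
--             target_sq = new_rank * 8 + new_file
--             mask |= 1 << target_sq
--
--     return mask
-- ===== SOURCE B (Python) =====
-- _M64 = (1 << 64) - 1
-- _FILE_A = 0x0101010101010101
-- _NOT_A = _M64 ^ _FILE_A
-- _NOT_H = _M64 ^ (_FILE_A << 7)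
-- _NOT_AB = _NOT_A & (_M64 ^ (_FILE_A << 1))
-- _NOT_GH = _NOT_H & (_M64 ^ (_FILE_A << 6))
--
--
-- def gen_knight_mask(square: int) -> int:
--     bb = 1 << square
--     return (
--         ((bb << 17) & _NOT_A)    # file +1, rank +2
--         | ((bb >> 15) & _NOT_A)  # file +1, rank -2
--         | ((bb << 15) & _NOT_H)  # file -1, rank +2
--         | ((bb >> 17) & _NOT_H)  # file -1, rank -2
--         | ((bb << 10) & _NOT_AB) # file +2, rank +1
--         | ((bb >> 6) & _NOT_AB)  # file +2, rank -1
--         | ((bb << 6) & _NOT_GH)  # file -2, rank +1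
--         | ((bb >> 10) & _NOT_GH) # file -2, rank -1
--     )
-- ===== Notes on version B (the rewrite author's own statement) =====
-- stated objective: alternative
-- what changed: Replaces the per-offset loop with file/rank decoding by the standard parallel bitboard computation: set a single-bit bitboard for the square, OR the eight knight shifts of bb, each masked by a precomputed file-exclusion mask (notA/notH/notAB/notGH) to drop wrap-around moves; Pre_ excludes negative squares, which are not board squares: B's natural single-bit shift raises ValueError there while A's floor-division decode happens to return a value.
-- outside the precondition, e.g. on gen_knight_mask(-1): A returns 16416, B raises ValueError
import Mathlib
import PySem

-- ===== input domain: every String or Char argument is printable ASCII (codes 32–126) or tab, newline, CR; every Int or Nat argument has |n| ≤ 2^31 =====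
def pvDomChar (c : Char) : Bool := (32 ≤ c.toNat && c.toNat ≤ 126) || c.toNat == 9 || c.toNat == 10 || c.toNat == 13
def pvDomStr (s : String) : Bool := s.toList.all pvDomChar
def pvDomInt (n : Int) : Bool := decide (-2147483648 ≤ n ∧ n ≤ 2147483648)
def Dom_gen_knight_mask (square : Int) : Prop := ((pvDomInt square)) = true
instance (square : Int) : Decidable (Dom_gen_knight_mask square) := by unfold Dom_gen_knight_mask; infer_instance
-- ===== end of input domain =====

-- B replaces A's per-offset loop with file/rank decoding by the standard parallel
-- bitboard shift-and-mask computation (alternative decomposition, same cost).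

-- ===== PORT A =====
def gen_knight_mask (square : Int) : Int :=
  let file := PySem.Int.mod square 8
  let rank := PySem.Int.floordiv square 8
  ([(-2,-1),(-2,1),(-1,-2),(-1,2),(1,-2),(1,2),(2,-1),(2,1)] : List (Int × Int)).foldl
    (fun mask dfr =>
      let new_file := file + dfr.1
      let new_rank := rank + dfr.2
      if 0 ≤ new_file ∧ new_file < 8 ∧ 0 ≤ new_rank ∧ new_rank < 8 then
        -- under the guard target_sq ≥ 0, so shifting by its toNat is Python-exact
        PySem.Int.bor mask ((1 : Int) <<< (new_rank * 8 + new_file).toNat)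
      else mask) 0

-- ===== PORT B =====
def pvM64 : Int := ((1:Int) <<< (64:Nat)) - 1
def pvFileA : Int := 0x0101010101010101
def pvNotA : Int := PySem.Int.bxor pvM64 pvFileA
def pvNotH : Int := PySem.Int.bxor pvM64 (pvFileA <<< (7:Nat))
def pvNotAB : Int := PySem.Int.band pvNotA (PySem.Int.bxor pvM64 (pvFileA <<< (1:Nat)))
def pvNotGH : Int := PySem.Int.band pvNotH (PySem.Int.bxor pvM64 (pvFileA <<< (6:Nat)))

def gen_knight_mask_alt (square : Int) : Int :=
  -- Python's bb = one-bit shift by square: under Pre_ square ≥ 0, so shifting by square.toNat is Python-exact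
  let bb : Int := (1 : Int) <<< square.toNat
  PySem.Int.bor (PySem.Int.bor (PySem.Int.bor (PySem.Int.bor (PySem.Int.bor (PySem.Int.bor (PySem.Int.bor
    (PySem.Int.band (bb <<< (17:Nat)) pvNotA)
    (PySem.Int.band (bb >>> (15:Nat)) pvNotA))
    (PySem.Int.band (bb <<< (15:Nat)) pvNotH))
    (PySem.Int.band (bb >>> (17:Nat)) pvNotH))
    (PySem.Int.band (bb <<< (10:Nat)) pvNotAB))
    (PySem.Int.band (bb >>> (6:Nat)) pvNotAB))
    (PySem.Int.band (bb <<< (6:Nat)) pvNotGH))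
    (PySem.Int.band (bb >>> (10:Nat)) pvNotGH)

-- ===== PRECONDITION & SPEC =====
-- Pre_ excludes negative squares, which are not board squares: B's natural single-bit shift
-- raises ValueError there, while A's floor-division decode happens to return a value.
def Pre_gen_knight_mask (square : Int) : Prop := 0 ≤ square
instance (square : Int) : Decidable (Pre_gen_knight_mask square) := by unfold Pre_gen_knight_mask; infer_instance
def pvWitness_gen_knight_mask : Int := 27

def Spec_gen_knight_mask (square : Int) (out : Int) : Prop := out = gen_knight_mask_alt square
instance (square : Int) (out : Int) : Decidable (Spec_gen_knight_mask square out) := by unfold Spec_gen_knight_mask; infer_instance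

-- ===== CLAIM =====
def Claim_equal_gen_knight_mask : Prop := ∀ (square : Int), Dom_gen_knight_mask square → Pre_gen_knight_mask square → Spec_gen_knight_mask square (gen_knight_mask square)

-- ===== LEMMAS AND PROOFS =====

-- From rank 10 up, every rank guard of A's loop fails, so A returns 0.
theorem gen_knight_mask_far (square : Int) (h : 80 ≤ square) :
    gen_knight_mask square = 0 := by
  have hm := PySem.Int.floordiv_mul_add_mod square 8
  have h0 := PySem.Int.mod_nonneg square (b := 8) (by norm_num)
  have h1 := PySem.Int.mod_lt square (b := 8) (by norm_num)
  unfold gen_knight_mask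
  simp only [List.foldl_cons, List.foldl_nil]
  rw [if_neg (by omega), if_neg (by omega), if_neg (by omega), if_neg (by omega),
      if_neg (by omega), if_neg (by omega), if_neg (by omega)]
  rw [if_neg (by omega)]

theorem shl_pow (m k : Nat) : ((2:Int)^m) <<< k = (2:Int)^(m+k) := by
  simp [Int.shiftLeft_eq, pow_add]

theorem shr_pow (m k : Nat) (h : k ≤ m) : ((2:Int)^m) >>> k = (2:Int)^(m-k) := by
  rw [Int.shiftRight_eq_div_pow, ← pow_sub_mul_pow (2:Int) h]
  push_cast
  rw [Int.mul_ediv_cancel _ (by positivity)]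

theorem band_pow_zero (m k : Nat) (c : Nat) (hm : k ≤ m) (hc : c < 2^k) :
    PySem.Int.band ((2:Int)^m) (c:Int) = 0 := by
  have h2 : ((2:Int)^m) = ((2^m : Nat) : Int) := by push_cast; ring
  rw [h2, PySem.Int.band_natCast]
  norm_cast
  rw [Nat.two_pow_and,
      Nat.testBit_lt_two_pow (lt_of_lt_of_le hc (Nat.pow_le_pow_right (by norm_num) hm))]
  simp

theorem pvNotA_val : pvNotA = ((0xfefefefefefefefe : Nat) : Int) := by decide
theorem pvNotH_val : pvNotH = ((0x7f7f7f7f7f7f7f7f : Nat) : Int) := by decide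
theorem pvNotAB_val : pvNotAB = ((0xfcfcfcfcfcfcfcfc : Nat) : Int) := by decide
theorem pvNotGH_val : pvNotGH = ((0x3f3f3f3f3f3f3f3f : Nat) : Int) := by decide

-- From square 80 up every shifted bit is off the 64-bit masks (the one bit that can
-- reach index 63, bb >> 17, meets notH, which has no bit 63), so B returns 0 too.
theorem gen_knight_mask_alt_far (square : Int) (h : 80 ≤ square) :
    gen_knight_mask_alt square = 0 := by
  have hn : 80 ≤ square.toNat := by omega
  simp only [gen_knight_mask_alt]
  have hbb : (1:Int) <<< square.toNat = (2:Int)^square.toNat := by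
    rw [Int.shiftLeft_eq]; ring
  rw [hbb, pvNotA_val, pvNotH_val, pvNotAB_val, pvNotGH_val,
      shl_pow, shl_pow, shl_pow, shl_pow,
      shr_pow _ 15 (by omega), shr_pow _ 17 (by omega),
      shr_pow _ 6 (by omega), shr_pow _ 10 (by omega),
      band_pow_zero _ 64 _ (by omega) (by norm_num),
      band_pow_zero _ 64 _ (by omega) (by norm_num),
      band_pow_zero _ 64 _ (by omega) (by norm_num),
      band_pow_zero _ 63 _ (by omega) (by norm_num),
      band_pow_zero _ 64 _ (by omega) (by norm_num),
      band_pow_zero _ 64 _ (by omega) (by norm_num),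
      band_pow_zero _ 64 _ (by omega) (by norm_num),
      band_pow_zero _ 63 _ (by omega) (by norm_num)]
  simp [PySem.Int.bor_zero]

theorem gen_knight_mask_near (square : Int) (h1 : 0 ≤ square) (h2 : square ≤ 79) :
    gen_knight_mask square = gen_knight_mask_alt square := by
  interval_cases square <;> decide

-- ===== VERDICT =====
theorem gen_knight_mask_spec : Claim_equal_gen_knight_mask := by
  intro square _ hpre
  unfold Spec_gen_knight_mask
  by_cases h : square ≤ 79
  · exact gen_knight_mask_near square hpre h
  · rw [gen_knight_mask_far square (by omega), gen_knight_mask_alt_far square (by omega)]
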